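-- pv_equiv track=rewrite | github.com/woyzeck1978/pensioenfondsen | scripts/document_parsing/extract_missing_pdf_metrics.py | match_pdf
-- ===== SOURCE A (Python) =====
-- def match_pdf(fund_name, pdf_files):
--     name_clean = fund_name.lower().replace('stichting', '').replace('pensioenfonds', '').strip()
--     keywords = name_clean.split()
--
--     # Priority 1: Exact keyword match
--     for pdf in pdf_files:
--         pdf_lower = pdf.lower()
--         if all(kw in pdf_lower for kw in keywords if len(kw) > 2):
--             return pdf
--
--     # Priority 2: Partial match
--     for pdf in pdf_files:
--         pdf_lower = pdf.lower()
--         if any(kw in pdf_lower for kw in keywords if len(kw) > 4):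
--             return pdf
--
--     return None
-- ===== SOURCE B (Python) =====
-- def match_pdf(fund_name, pdf_files):
--     name_clean = fund_name.lower().replace('stichting', '').replace('pensioenfonds', '').strip()
--     keywords = name_clean.split()
--     exact_kws = [kw for kw in keywords if len(kw) > 2]
--     partial_kws = [kw for kw in keywords if len(kw) > 4]
--     fallback = None
--     for pdf in pdf_files:
--         pdf_lower = pdf.lower()
--         if all(kw in pdf_lower for kw in exact_kws):
--             return pdf
--         if fallback is None and any(kw in pdf_lower for kw in partial_kws):
--             fallback = pdf
--     return fallback
-- ===== Notes on version B (the rewrite author's own statement) =====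
-- stated objective: alternative
-- what changed: Single pass over pdf_files (keyword lists filtered once up front) that returns an exact match immediately and records the first partial match as a fallback, replacing A's two full scans.
import Mathlib
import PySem

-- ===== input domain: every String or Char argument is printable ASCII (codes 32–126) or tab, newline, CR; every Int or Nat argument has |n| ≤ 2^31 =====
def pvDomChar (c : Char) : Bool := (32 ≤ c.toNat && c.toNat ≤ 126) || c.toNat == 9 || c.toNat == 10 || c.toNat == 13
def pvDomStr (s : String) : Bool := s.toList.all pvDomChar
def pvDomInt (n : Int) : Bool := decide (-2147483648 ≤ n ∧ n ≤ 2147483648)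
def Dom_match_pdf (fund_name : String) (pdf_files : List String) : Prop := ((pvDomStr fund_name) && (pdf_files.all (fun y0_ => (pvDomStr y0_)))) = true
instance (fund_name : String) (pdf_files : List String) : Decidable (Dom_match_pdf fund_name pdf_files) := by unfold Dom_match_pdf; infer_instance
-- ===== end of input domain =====

-- B replaces A's two full scans by one pass that returns an exact match immediately
-- and keeps the first partial match as a fallback; keyword lists are filtered once.

-- ===== PORT A =====
def match_pdf (fund_name : String) (pdf_files : List String) : Option String :=
  let name_clean := PySem.Str.strip
    (PySem.Str.replace (PySem.Str.replace (PySem.Str.lower fund_name) "stichting" "") "pensioenfonds" "")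
  let keywords := PySem.Str.split₀ name_clean
  -- Priority 1: Exact keyword match (first pdf where all keywords of len > 2 occur)
  match pdf_files.find? (fun pdf =>
      (keywords.filter (fun kw => 2 < PySem.Str.len kw)).all
        (fun kw => PySem.Str.isIn kw (PySem.Str.lower pdf))) with
  | some pdf => some pdf
  | none =>
    -- Priority 2: Partial match (first pdf where some keyword of len > 4 occurs)
    pdf_files.find? (fun pdf =>
      (keywords.filter (fun kw => 4 < PySem.Str.len kw)).any
        (fun kw => PySem.Str.isIn kw (PySem.Str.lower pdf)))

-- ===== PORT B =====
-- single loop with early return for exact matches and a first-partial fallback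
def match_pdf_alt_loop (exact_kws partial_kws : List String) :
    List String → Option String → Option String
  | [], fallback => fallback
  | pdf :: rest, fallback =>
    let pdf_lower := PySem.Str.lower pdf
    if exact_kws.all (fun kw => PySem.Str.isIn kw pdf_lower) then some pdf
    else if fallback.isNone && partial_kws.any (fun kw => PySem.Str.isIn kw pdf_lower) then
      match_pdf_alt_loop exact_kws partial_kws rest (some pdf)
    else
      match_pdf_alt_loop exact_kws partial_kws rest fallback

def match_pdf_alt (fund_name : String) (pdf_files : List String) : Option String :=
  let name_clean := PySem.Str.strip
    (PySem.Str.replace (PySem.Str.replace (PySem.Str.lower fund_name) "stichting" "") "pensioenfonds" "")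
  let keywords := PySem.Str.split₀ name_clean
  let exact_kws := keywords.filter (fun kw => 2 < PySem.Str.len kw)
  let partial_kws := keywords.filter (fun kw => 4 < PySem.Str.len kw)
  match_pdf_alt_loop exact_kws partial_kws pdf_files none

-- ===== PRECONDITION & SPEC =====
def Spec_match_pdf (fund_name : String) (pdf_files : List String) (out : Option String) : Prop := out = match_pdf_alt fund_name pdf_files
instance (fund_name : String) (pdf_files : List String) (out : Option String) : Decidable (Spec_match_pdf fund_name pdf_files out) := by unfold Spec_match_pdf; infer_instance

-- ===== CLAIM (what is proved, stated in full; the proofs are below) =====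
def Claim_equal_match_pdf : Prop := ∀ (fund_name : String) (pdf_files : List String), Dom_match_pdf fund_name pdf_files → Spec_match_pdf fund_name pdf_files (match_pdf fund_name pdf_files)

-- ===== LEMMAS AND PROOFS =====

-- B's loop computes: first exact match, else the fallback if already set, else first partial match.
theorem match_pdf_alt_loop_eq (exact_kws partial_kws : List String)
    (l : List String) (fb : Option String) :
    match_pdf_alt_loop exact_kws partial_kws l fb =
      match l.find? (fun pdf => exact_kws.all (fun kw => PySem.Str.isIn kw (PySem.Str.lower pdf))) with
      | some p => some p
      | none =>
        match fb with
        | some f => some f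
        | none => l.find? (fun pdf => partial_kws.any (fun kw => PySem.Str.isIn kw (PySem.Str.lower pdf))) := by
  induction l generalizing fb with
  | nil => cases fb <;> rfl
  | cons pdf rest ih =>
    cases hex : exact_kws.all (fun kw => PySem.Str.isIn kw (PySem.Str.lower pdf)) with
    | true => simp only [match_pdf_alt_loop, List.find?_cons, hex, if_pos]
    | false =>
      cases fb with
      | some f =>
        simp only [match_pdf_alt_loop, List.find?_cons, hex, Bool.false_eq_true, if_false,
          Option.isNone_some, Bool.false_and, ih]
      | none =>
        cases hp : partial_kws.any (fun kw => PySem.Str.isIn kw (PySem.Str.lower pdf)) with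
        | true =>
          simp only [match_pdf_alt_loop, List.find?_cons, hex, hp, Bool.false_eq_true, if_false,
            Option.isNone_none, Bool.true_and, if_true, ih]
        | false =>
          simp only [match_pdf_alt_loop, List.find?_cons, hex, hp, Bool.false_eq_true, if_false,
            Option.isNone_none, Bool.true_and, ih]

-- ===== VERDICT (by name: the statement is the Claim_ definition above) =====
theorem match_pdf_spec : Claim_equal_match_pdf := by
  intro fund_name pdf_files _
  unfold Spec_match_pdf match_pdf match_pdf_alt
  rw [match_pdf_alt_loop_eq]
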